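-- pv_equiv track=rewrite | github.com/ayrtoncarlos/-Python-Para-Bioinformatica | Aula 7 - Programação Dinâmica, Fibonacci e Geração de Coelhos/Arquivos/Programação Dinâmica, Fibonacci e Geração de Coelhos.py | population
-- ===== SOURCE A (Python) =====
-- def population(n, k):
--
--     rabbits_populations = []
--
--     for i in range(n):
--
--         if i < 2:
--
--             rabbits_populations.append(1)
--
--         else:
--
--             rabbits_populations.append(rabbits_populations[-1] + rabbits_populations[-2] * k)
--
--     return rabbits_populations
-- ===== SOURCE B (Python) =====
-- def mat_mul(x, y):
--     (a, b), (c, d) = x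
--     (e, f), (g, h) = y
--     return ((a * e + b * g, a * f + b * h), (c * e + d * g, c * f + d * h))
--
--
-- def population(n, k):
--     # a(i) is the top-left entry of the i-th power of the companion matrix [[1, k], [1, 0]]
--     m = ((1, k), (1, 0))
--     p = ((1, 0), (0, 1))
--     out = []
--     for _ in range(n):
--         out.append(p[0][0])
--         p = mat_mul(p, m)
--     return out
-- ===== Notes on version B (the rewrite author's own statement) =====
-- stated objective: alternative
-- what changed: B computes each term as the top-left entry of the i-th power of the companion matrix [[1,k],[1,0]], maintained by an explicit 2x2 matrix multiplication, instead of A's direct sequence recurrence read back from the output list.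
import Mathlib
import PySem

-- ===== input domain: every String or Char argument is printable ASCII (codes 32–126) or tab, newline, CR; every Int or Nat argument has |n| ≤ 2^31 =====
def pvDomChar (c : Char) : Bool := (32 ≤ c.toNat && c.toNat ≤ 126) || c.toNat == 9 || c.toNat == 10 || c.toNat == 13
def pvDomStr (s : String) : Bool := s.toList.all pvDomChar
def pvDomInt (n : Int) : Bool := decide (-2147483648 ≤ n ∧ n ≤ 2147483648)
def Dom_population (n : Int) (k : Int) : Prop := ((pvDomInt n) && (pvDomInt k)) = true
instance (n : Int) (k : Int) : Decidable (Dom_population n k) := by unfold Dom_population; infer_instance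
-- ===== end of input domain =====

-- B computes each term as the top-left entry of the i-th power of the companion matrix
-- [[1,k],[1,0]], maintained by explicit 2x2 matrix multiplication, instead of A's direct
-- recurrence read back from the output list (alternative algorithm, same cost).

-- ===== PORT A =====
-- accumulator is the growing rabbits_populations list; the indices [-1]/[-2] are always
-- in range when the else branch runs, so .getD 0 never supplies its default
def population (n : Int) (k : Int) : List Int :=
  (PySem.List.pyRange 0 n 1).foldl
    (fun acc i =>
      if i < 2 then acc ++ [1]
      else acc ++ [((PySem.List.pyGet? acc (-1)).getD 0) + ((PySem.List.pyGet? acc (-2)).getD 0) * k])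
    []

-- ===== PORT B =====
-- 2x2 integer matrix as a pair of rows
def matMul (x y : (Int × Int) × (Int × Int)) : (Int × Int) × (Int × Int) :=
  ((x.1.1 * y.1.1 + x.1.2 * y.2.1, x.1.1 * y.1.2 + x.1.2 * y.2.2),
   (x.2.1 * y.1.1 + x.2.2 * y.2.1, x.2.1 * y.1.2 + x.2.2 * y.2.2))

-- the local binding m = ((1, k), (1, 0)) of Source B is inlined at its sole use site
def population_alt (n : Int) (k : Int) : List Int :=
  ((PySem.List.pyRange 0 n 1).foldl
    (fun (st : List Int × ((Int × Int) × (Int × Int))) _ =>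
      (st.1 ++ [st.2.1.1], matMul st.2 ((1, k), (1, 0))))
    ([], ((1, 0), (0, 1)))).1

-- ===== PRECONDITION & SPEC =====
def Spec_population (n : Int) (k : Int) (out : List Int) : Prop := out = population_alt n k
instance (n : Int) (k : Int) (out : List Int) : Decidable (Spec_population n k out) := by unfold Spec_population; infer_instance

-- ===== CLAIM (what is proved, stated in full; the proofs are below) =====
def Claim_equal_population : Prop := ∀ (n : Int) (k : Int), Dom_population n k → Spec_population n k (population n k)

-- ===== LEMMAS AND PROOFS =====

-- reference sequence a(i)
def aref (k : Int) : Nat → Int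
  | 0 => 1
  | 1 => 1
  | (m + 2) => aref k (m + 1) + aref k m * k

-- matrix power sequence of B
def matPow (k : Int) : Nat → (Int × Int) × (Int × Int)
  | 0 => ((1, 0), (0, 1))
  | (m + 1) => matMul (matPow k m) ((1, k), (1, 0))

lemma pyGet_last_two (pre : List Int) (a b : Int) :
    (PySem.List.pyGet? (pre ++ [a, b]) (-1)).getD 0 = b ∧
    (PySem.List.pyGet? (pre ++ [a, b]) (-2)).getD 0 = a := by
  constructor
  · rw [show pre ++ [a, b] = (pre ++ [a]) ++ [b] by simp, PySem.List.pyGet?_neg_one_append_singleton]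
    rfl
  · rw [PySem.List.pyGet?_neg_ofNat (pre ++ [a, b]) 2 (by omega) (by simp)]
    simp

lemma matPow_topRow (k : Int) : ∀ m : Nat,
    (matPow k (m + 1)).1.1 = aref k (m + 1) ∧ (matPow k (m + 1)).1.2 = k * aref k m := by
  intro m
  induction m with
  | zero => simp [matPow, matMul, aref]
  | succ m ih =>
    obtain ⟨h1, h2⟩ := ih
    constructor
    · show (matMul (matPow k (m + 1)) ((1, k), (1, 0))).1.1 = _
      simp only [matMul, h1, h2, aref]
      ring
    · show (matMul (matPow k (m + 1)) ((1, k), (1, 0))).1.2 = _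
      simp only [matMul, h1, h2]
      ring

lemma matPow_tl (k : Int) : ∀ m : Nat, (matPow k m).1.1 = aref k m := by
  intro m
  match m with
  | 0 => rfl
  | m + 1 => exact (matPow_topRow k m).1

lemma range_map_last_two (k : Int) (m : Nat) :
    (List.range (m + 2)).map (aref k)
      = ((List.range m).map (aref k)) ++ [aref k m, aref k (m + 1)] := by
  rw [List.range_succ, List.range_succ]
  simp

lemma foldA_eq (k : Int) : ∀ m : Nat,
    (PySem.List.pyRange 0 (m : Int) 1).foldl
      (fun acc i =>
        if i < 2 then acc ++ [1]
        else acc ++ [((PySem.List.pyGet? acc (-1)).getD 0) + ((PySem.List.pyGet? acc (-2)).getD 0) * k])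
      []
    = (List.range m).map (aref k) := by
  intro m
  induction m with
  | zero => simp [PySem.List.pyRange_one_eq_nil]
  | succ m ih =>
    rw [show ((m + 1 : Nat) : Int) = (m : Int) + 1 by push_cast; ring]
    rw [PySem.List.pyRange_one_append 0 m ((m : Int) + 1) (by omega) (by omega),
      List.foldl_append, ih,
      PySem.List.pyRange_one_cons (by omega : (m : Int) < (m : Int) + 1),
      PySem.List.pyRange_one_eq_nil (by omega : (m : Int) + 1 ≤ (m : Int) + 1)]
    simp only [List.foldl_cons, List.foldl_nil]
    match m with
    | 0 => norm_num [List.range_succ, aref]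
    | 1 => norm_num [List.range_succ, aref]
    | m + 2 =>
      rw [if_neg (by push_cast; omega), range_map_last_two k m]
      obtain ⟨h1, h2⟩ := pyGet_last_two ((List.range m).map (aref k)) (aref k m) (aref k (m + 1))
      rw [h1, h2, List.range_succ]
      simp [range_map_last_two k m, aref]

lemma foldB_eq (k : Int) : ∀ m : Nat,
    (PySem.List.pyRange 0 (m : Int) 1).foldl
      (fun (st : List Int × ((Int × Int) × (Int × Int))) _ =>
        (st.1 ++ [st.2.1.1], matMul st.2 ((1, k), (1, 0))))
      ([], ((1, 0), (0, 1)))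
    = ((List.range m).map (aref k), matPow k m) := by
  intro m
  induction m with
  | zero => simp [PySem.List.pyRange_one_eq_nil, matPow]
  | succ m ih =>
    rw [show ((m + 1 : Nat) : Int) = (m : Int) + 1 by push_cast; ring]
    rw [PySem.List.pyRange_one_append 0 m ((m : Int) + 1) (by omega) (by omega),
      List.foldl_append, ih,
      PySem.List.pyRange_one_cons (by omega : (m : Int) < (m : Int) + 1),
      PySem.List.pyRange_one_eq_nil (by omega : (m : Int) + 1 ≤ (m : Int) + 1)]
    simp only [List.foldl_cons, List.foldl_nil]
    rw [matPow_tl, List.range_succ]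
    simp [matPow]

-- ===== VERDICT (by name: the statement is the Claim_ definition above) =====
theorem population_spec : Claim_equal_population := by
  intro n k _
  unfold Spec_population population population_alt
  by_cases h0 : n ≤ 0
  · rw [PySem.List.pyRange_one_eq_nil h0]; rfl
  · have hn : n = ((n.toNat : Nat) : Int) := by omega
    rw [hn, foldA_eq k n.toNat, foldB_eq k n.toNat]
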